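-- pv_equiv track=rewrite | github.com/haminthecoder/leetcode_solution | medium/makePalindrome.py | solution
-- ===== SOURCE A (Python) =====
-- def solution(S):
--     # write your code in Python 3.6
--     if len(S) == 0:
--         return ""
--     lo, hi = 0, len(S)-1
--     S = list(S)
--     while lo < hi:
--         if S[lo] == '?' and S[hi] == '?':
--             S[lo], S[hi] = 'a', 'a'
--         elif S[lo] != '?'and S[hi] == "?":
--             S[hi] = S[lo]
--         elif S[hi] != '?' and S[lo] == "?":
--             S[lo] = S[hi]
--         else:
--             if S[lo] != S[hi]:
--                 return "NO"
--         lo += 1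
--         hi -= 1
--     if S[lo] == "?":
--         S[lo] = 'a'
--
--     return "".join(S)
-- ===== SOURCE B (Python) =====
-- def solution(S):
--     n = len(S)
--     m = n - 1
--     cand = [S[i] if S[i] != '?' else (S[m - i] if S[m - i] != '?' else 'a') for i in range(n)]
--     return ''.join(cand) if cand == cand[::-1] else 'NO'
-- ===== Notes on version B (the rewrite author's own statement) =====
-- stated objective: simpler
-- what changed: A mutates a char list with a two-pointer while-loop that fixes '?' in place and early-returns 'NO'; B builds the candidate in one comprehension (each '?' takes its mirror's character, defaulting to 'a') and then rejects with a separate whole-string palindrome check.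
import Mathlib
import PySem

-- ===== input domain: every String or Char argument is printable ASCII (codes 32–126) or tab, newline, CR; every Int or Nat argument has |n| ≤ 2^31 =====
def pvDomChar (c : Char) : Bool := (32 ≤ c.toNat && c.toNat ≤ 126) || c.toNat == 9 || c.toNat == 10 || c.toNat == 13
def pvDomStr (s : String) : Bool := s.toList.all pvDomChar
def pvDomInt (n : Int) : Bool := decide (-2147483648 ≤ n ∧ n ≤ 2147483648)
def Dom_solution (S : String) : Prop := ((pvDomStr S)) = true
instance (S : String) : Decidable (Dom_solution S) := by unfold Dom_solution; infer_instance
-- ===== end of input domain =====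

-- B replaces A's mutating two-pointer while-loop by one comprehension building the candidate
-- (each '?' takes its mirror's character, default 'a') plus a separate palindrome check (objective: simpler).

-- ===== PORT A =====
-- A's while-loop: two pointers lo/hi over a mutable char list; none = "return 'NO'",
-- otherwise the final value of lo together with the mutated list.
-- fuel only makes the recursion structural; the call site passes enough fuel for the whole loop
def solAux (fuel : Nat) (s : List Char) (lo hi : Nat) : Option (Nat × List Char) :=
  match fuel with
  | 0 => some (lo, s)
  | fuel + 1 =>
    if lo < hi then
      if s.getD lo ' ' = '?' ∧ s.getD hi ' ' = '?' then
        solAux fuel ((s.set lo 'a').set hi 'a') (lo+1) (hi-1)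
      else if s.getD lo ' ' ≠ '?' ∧ s.getD hi ' ' = '?' then
        solAux fuel (s.set hi (s.getD lo ' ')) (lo+1) (hi-1)
      else if s.getD hi ' ' ≠ '?' ∧ s.getD lo ' ' = '?' then
        solAux fuel (s.set lo (s.getD hi ' ')) (lo+1) (hi-1)
      else if s.getD lo ' ' ≠ s.getD hi ' ' then none
      else solAux fuel s (lo+1) (hi-1)
    else some (lo, s)

def solution (S : String) : String :=
  let l := S.toList
  if l.length = 0 then "" else
  match solAux l.length l 0 (l.length - 1) with
  | none => "NO"
  | some (flo, fs) => String.ofList (if fs.getD flo ' ' = '?' then fs.set flo 'a' else fs)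

-- ===== PORT B =====
def solution_alt (S : String) : String :=
  let l := S.toList
  let n := l.length
  let cand := (List.range n).map (fun i =>
    if l.getD i ' ' ≠ '?' then l.getD i ' '
    else if l.getD (n - 1 - i) ' ' ≠ '?' then l.getD (n - 1 - i) ' '
    else 'a')
  if cand = cand.reverse then String.ofList cand else "NO"

-- ===== PRECONDITION & SPEC =====
def Spec_solution (S : String) (out : String) : Prop := out = solution_alt S
instance (S : String) (out : String) : Decidable (Spec_solution S out) := by unfold Spec_solution; infer_instance

-- ===== CLAIM (what is proved, stated in full; the proofs are below) =====
def Claim_equal_solution : Prop := ∀ (S : String), Dom_solution S → Spec_solution S (solution S)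

-- ===== LEMMAS AND PROOFS =====

-- the character both members of the pair (j, m - j) end up with (B's candidate character)
def pickv (s : List Char) (m j : Nat) : Char :=
  if s.getD j ' ' ≠ '?' then s.getD j ' '
  else if s.getD (m - j) ' ' ≠ '?' then s.getD (m - j) ' '
  else 'a'

-- the pair (i, m - i) is a hard conflict: both fixed and different
def confB (s : List Char) (m i : Nat) : Bool :=
  (s.getD i ' ' != '?') && (s.getD (m - i) ' ' != '?') && (s.getD i ' ' != s.getD (m - i) ' ')

-- some pair with lower index ≥ lo inside the window [lo, hi] is a conflict
def hasConf (s : List Char) (lo hi : Nat) : Bool :=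
  (List.range' lo ((hi - lo + 1) / 2)).any (fun i => confB s (lo + hi) i)

-- the window [lo, hi] rewritten: every non-middle position gets its pair's pick
def resMap (s : List Char) (lo hi : Nat) : List Char :=
  s.mapIdx (fun j c => if lo ≤ j ∧ j ≤ hi ∧ 2 * j ≠ lo + hi then pickv s (lo + hi) j else c)

-- B's candidate list
def candL (l : List Char) : List Char :=
  (List.range l.length).map (fun i => pickv l (l.length - 1) i)

lemma pickv_ne (s : List Char) (m j : Nat) : pickv s m j ≠ '?' := by
  unfold pickv; split_ifs <;> simp_all

lemma pickv_congr (s s' : List Char) (m j : Nat)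
    (h1 : s'.getD j ' ' = s.getD j ' ') (h2 : s'.getD (m - j) ' ' = s.getD (m - j) ' ') :
    pickv s' m j = pickv s m j := by
  unfold pickv; rw [h1, h2]

lemma pickv_symm (s : List Char) (m i : Nat) (him : i ≤ m) (h : confB s m i = false) :
    pickv s m (m - i) = pickv s m i := by
  have hmi : m - (m - i) = i := by omega
  unfold pickv confB at *
  rw [hmi]
  by_cases ha : s.getD i ' ' = '?' <;> by_cases hb : s.getD (m - i) ' ' = '?' <;>
    simp_all

lemma hasConf_iff (s : List Char) (lo hi : Nat) :
    hasConf s lo hi = true ↔ ∃ i, lo ≤ i ∧ 2 * i < lo + hi ∧ confB s (lo + hi) i = true := by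
  unfold hasConf
  rw [List.any_eq_true]
  constructor
  · rintro ⟨i, hm, hc⟩
    rw [List.mem_range'_1] at hm
    exact ⟨i, by omega, by omega, hc⟩
  · rintro ⟨i, h1, h2, hc⟩
    exact ⟨i, by rw [List.mem_range'_1]; omega, hc⟩

lemma getD_set_ne (t : List Char) (i : Nat) (v : Char) (j : Nat) (hij : i ≠ j) :
    (t.set i v).getD j ' ' = t.getD j ' ' := by
  simp [List.getD_eq_getElem?_getD, List.getElem?_set_ne hij]

lemma getD_set_eq (t : List Char) (i : Nat) (v : Char) (hi : i < t.length) :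
    (t.set i v).getD i ' ' = v := by
  rw [List.getD_eq_getElem _ ' ' (by simpa using hi)]
  simp

lemma step (s s' : List Char) (lo hi : Nat) (hlh : lo < hi) (hhi : hi < s.length)
    (hlen : s'.length = s.length)
    (hset : ∀ j, j < s.length → j ≠ lo → j ≠ hi → s'.getD j ' ' = s.getD j ' ')
    (hsl : s'.getD lo ' ' = pickv s (lo + hi) lo)
    (hsh : s'.getD hi ' ' = pickv s (lo + hi) lo)
    (hnc : confB s (lo + hi) lo = false) :
    hasConf s' (lo + 1) (hi - 1) = hasConf s lo hi ∧
      resMap s' (lo + 1) (hi - 1) = resMap s lo hi := by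
  have hsum : (lo + 1) + (hi - 1) = lo + hi := by omega
  have hgd : ∀ j, lo < j → j < hi → s'.getD j ' ' = s.getD j ' ' := fun j h1 h2 =>
    hset j (by omega) (by omega) (by omega)
  have hconf : ∀ i, lo < i → 2 * i < lo + hi → confB s' (lo + hi) i = confB s (lo + hi) i := by
    intro i h1 h2
    unfold confB
    rw [hgd i h1 (by omega), hgd (lo + hi - i) (by omega) (by omega)]
  constructor
  · rw [Bool.eq_iff_iff, hasConf_iff, hasConf_iff, hsum]
    constructor
    · rintro ⟨i, h1, h2, hc⟩
      exact ⟨i, by omega, by omega, by rw [← hconf i (by omega) (by omega)]; exact hc⟩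
    · rintro ⟨i, h1, h2, hc⟩
      rcases Nat.lt_or_ge lo i with hlt | hge
      · exact ⟨i, by omega, by omega, by rw [hconf i hlt (by omega)]; exact hc⟩
      · have : i = lo := by omega
        subst this
        rw [hc] at hnc; exact absurd hnc (by simp)
  · apply List.ext_getElem
    · simp [resMap, hlen]
    · intro j hj1 hj2
      unfold resMap
      rw [List.getElem_mapIdx, List.getElem_mapIdx]
      have hjlen : j < s.length := by simpa [resMap, hlen] using hj2
      have hjlen' : j < s'.length := by omega
      have hgE : ∀ (t : List Char) (k : Nat) (hk : k < t.length), t.getD k ' ' = t[k] :=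
        fun t k hk => List.getD_eq_getElem t ' ' hk
      simp only [hsum]
      by_cases hcase : lo ≤ j ∧ j ≤ hi ∧ 2 * j ≠ lo + hi
      · obtain ⟨c1, c2, c3⟩ := hcase
        by_cases hjlo : j = lo
        · simp only [if_neg (by omega : ¬ (lo + 1 ≤ j ∧ j ≤ hi - 1 ∧ 2 * j ≠ lo + hi)),
            if_pos (⟨c1, c2, c3⟩ : lo ≤ j ∧ j ≤ hi ∧ 2 * j ≠ lo + hi)]
          rw [← hgE s' j hjlen', hjlo]
          exact hsl
        · by_cases hjhi : j = hi
          · simp only [if_neg (by omega : ¬ (lo + 1 ≤ j ∧ j ≤ hi - 1 ∧ 2 * j ≠ lo + hi)),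
              if_pos (⟨c1, c2, c3⟩ : lo ≤ j ∧ j ≤ hi ∧ 2 * j ≠ lo + hi)]
            rw [← hgE s' j hjlen', hjhi, hsh]
            have hsym := pickv_symm s (lo + hi) lo (by omega) hnc
            rw [show lo + hi - lo = hi by omega] at hsym
            exact hsym.symm
          · have hin1 : lo < j := by omega
            have hin2 : j < hi := by omega
            simp only [if_pos (⟨by omega, by omega, by omega⟩ :
                lo + 1 ≤ j ∧ j ≤ hi - 1 ∧ 2 * j ≠ lo + hi),
              if_pos (⟨c1, c2, c3⟩ : lo ≤ j ∧ j ≤ hi ∧ 2 * j ≠ lo + hi)]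
            exact pickv_congr s s' (lo + hi) j (hgd j hin1 hin2)
              (hgd (lo + hi - j) (by omega) (by omega))
      · have hcase' : ¬ (lo + 1 ≤ j ∧ j ≤ hi - 1 ∧ 2 * j ≠ lo + hi) := by omega
        simp only [if_neg hcase, if_neg hcase']
        by_cases hjlo : j = lo
        · omega
        · by_cases hjhi : j = hi
          · omega
          · rw [← hgE s' j hjlen', ← hgE s j hjlen]
            exact hset j hjlen hjlo hjhi

lemma resMap_id (s : List Char) (lo hi : Nat) (h : hi ≤ lo) (h2 : lo ≤ hi + 1) :
    resMap s lo hi = s := by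
  apply List.ext_getElem
  · simp [resMap]
  · intro j hj1 hj2
    unfold resMap
    rw [List.getElem_mapIdx]
    rw [if_neg (by omega)]

lemma solAux_spec (k : Nat) (s : List Char) (lo hi : Nat) (hhi : hi < s.length)
    (hle : lo ≤ hi + 1) (hk : hi - lo ≤ k) :
    solAux k s lo hi =
      if hasConf s lo hi then none else some ((lo + hi + 1) / 2, resMap s lo hi) := by
  induction k generalizing s lo hi with
  | zero =>
    rw [solAux]
    have hc : hasConf s lo hi = false := by
      unfold hasConf
      rw [show (hi - lo + 1) / 2 = 0 by omega]
      simp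
    rw [hc, if_neg (by simp), resMap_id s lo hi (by omega) hle]
    congr 2
    omega
  | succ k ih =>
    by_cases hlh : lo < hi
    · rw [solAux, if_pos hlh]
      set a := s.getD lo ' ' with ha
      set b := s.getD hi ' ' with hb
      have hmlo : lo + hi - lo = hi := by omega
      have hrec : ∀ s' : List Char, s'.length = s.length →
          (∀ j, j < s.length → j ≠ lo → j ≠ hi → s'.getD j ' ' = s.getD j ' ') →
          s'.getD lo ' ' = pickv s (lo + hi) lo →
          s'.getD hi ' ' = pickv s (lo + hi) lo →
          confB s (lo + hi) lo = false →
          solAux k s' (lo + 1) (hi - 1) =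
            if hasConf s lo hi then none else some ((lo + hi + 1) / 2, resMap s lo hi) := by
        intro s' hlen hset hsl hsh hnc
        obtain ⟨e1, e2⟩ := step s s' lo hi hlh hhi hlen hset hsl hsh hnc
        rw [ih s' (lo + 1) (hi - 1) (by omega) (by omega) (by omega), e1, e2]
        rw [show ((lo + 1) + (hi - 1) + 1) / 2 = (lo + hi + 1) / 2 by omega]
      by_cases c1 : a = '?' ∧ b = '?'
      · rw [if_pos c1]
        apply hrec
        · simp
        · intro j hj hj1 hj2
          rw [getD_set_ne _ _ _ _ (Ne.symm hj2), getD_set_ne _ _ _ _ (Ne.symm hj1)]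
        · rw [getD_set_ne _ _ _ _ (by omega), getD_set_eq _ _ _ (by omega)]
          unfold pickv
          rw [hmlo, ← ha, ← hb, c1.1, c1.2]; simp
        · rw [getD_set_eq _ _ _ (by simpa using hhi)]
          unfold pickv
          rw [hmlo, ← ha, ← hb, c1.1, c1.2]; simp
        · unfold confB; rw [hmlo, ← ha, c1.1]; simp
      · rw [if_neg c1]
        by_cases c2 : a ≠ '?' ∧ b = '?'
        · rw [if_pos c2]
          apply hrec
          · simp
          · intro j hj hj1 hj2
            rw [getD_set_ne _ _ _ _ (Ne.symm hj2)]
          · rw [getD_set_ne _ _ _ _ (by omega)]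
            unfold pickv
            rw [hmlo, ← ha, if_pos c2.1]
          · rw [getD_set_eq _ _ _ hhi]
            unfold pickv
            rw [hmlo, ← ha, if_pos c2.1]
          · unfold confB; rw [hmlo, ← hb, c2.2]; simp
        · rw [if_neg c2]
          by_cases c3 : b ≠ '?' ∧ a = '?'
          · rw [if_pos c3]
            apply hrec
            · simp
            · intro j hj hj1 hj2
              rw [getD_set_ne _ _ _ _ (Ne.symm hj1)]
            · rw [getD_set_eq _ _ _ (by omega)]
              unfold pickv
              rw [hmlo, ← ha, ← hb, if_neg (by simpa using c3.2), if_pos c3.1]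
            · rw [getD_set_ne _ _ _ _ (by omega)]
              unfold pickv
              rw [hmlo, ← ha, ← hb, if_neg (by simpa using c3.2), if_pos c3.1]
            · unfold confB; rw [hmlo, ← ha, c3.2]; simp
          · rw [if_neg c3]
            by_cases c4 : a ≠ b
            · rw [if_pos c4]
              have hab : a ≠ '?' ∧ b ≠ '?' := by tauto
              have hc : hasConf s lo hi = true := by
                rw [hasConf_iff]
                refine ⟨lo, le_refl _, by omega, ?_⟩
                unfold confB
                rw [hmlo, ← ha, ← hb]
                simp [hab.1, hab.2, c4]
              rw [hc, if_pos rfl]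
            · rw [if_neg c4]
              have c4' : a = b := not_ne_iff.mp c4
              have ha' : a ≠ '?' := fun h => c1 ⟨h, c4' ▸ h⟩
              apply hrec s rfl (fun _ _ _ _ => rfl)
              · unfold pickv
                rw [hmlo, ← ha, if_pos ha']
              · unfold pickv
                rw [hmlo, ← ha, if_pos ha']
                exact c4'.symm
              · unfold confB
                rw [hmlo, ← ha, ← hb, c4']
                simp
    · rw [solAux, if_neg hlh]
      have hc : hasConf s lo hi = false := by
        unfold hasConf
        rw [show (hi - lo + 1) / 2 = 0 by omega]
        simp
      rw [hc, if_neg (by simp), resMap_id s lo hi (by omega) hle]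
      congr 2
      omega

lemma candL_getElem (l : List Char) (j : Nat) (hj : j < (candL l).length) :
    (candL l)[j] = pickv l (l.length - 1) j := by
  simp [candL]

lemma conf_palin (l : List Char) :
    (candL l = (candL l).reverse) ↔ hasConf l 0 (l.length - 1) = false := by
  constructor
  · intro h
    by_contra hc
    rw [Bool.not_eq_false, hasConf_iff] at hc
    obtain ⟨i, _, h2, hcf⟩ := hc
    simp only [Nat.zero_add] at h2 hcf
    unfold confB at hcf
    simp only [Bool.and_eq_true, bne_iff_ne] at hcf
    have hi1 : i < l.length := by omega
    have hi2 : l.length - 1 - i < l.length := by omega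
    have hlen : (candL l).length = l.length := by simp [candL]
    have e1 : (candL l)[i]? = ((candL l).reverse)[i]? := by rw [← h]
    rw [List.getElem?_eq_getElem (by omega), List.getElem?_eq_getElem (by simp; omega)] at e1
    rw [List.getElem_reverse, candL_getElem, candL_getElem] at e1
    rw [show (candL l).length - 1 - i = l.length - 1 - i by omega] at e1
    have p1 : pickv l (l.length - 1) i = l.getD i ' ' := by
      unfold pickv; rw [if_pos hcf.1.1]
    have p2 : pickv l (l.length - 1) (l.length - 1 - i) = l.getD (l.length - 1 - i) ' ' := by
      unfold pickv; rw [if_pos hcf.1.2]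
    rw [p1, p2] at e1
    exact hcf.2 (Option.some_injective _ e1)
  · intro hc
    apply List.ext_getElem
    · simp
    · intro j hj1 hj2
      have hn : j < l.length := by simpa [candL] using hj1
      rw [List.getElem_reverse, candL_getElem, candL_getElem]
      rw [show (candL l).length - 1 - j = l.length - 1 - j by simp [candL]]
      have hnoc : ∀ i, 2 * i < l.length - 1 → confB l (l.length - 1) i = false := by
        intro i hilt
        by_contra hcc
        rw [Bool.not_eq_false] at hcc
        have : hasConf l 0 (l.length - 1) = true := by
          rw [hasConf_iff]
          exact ⟨i, Nat.zero_le _, by omega, by simpa using hcc⟩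
        rw [this] at hc; exact absurd hc (by simp)
      rcases lt_trichotomy (2 * j) (l.length - 1) with h | h | h
      · exact (pickv_symm l (l.length - 1) j (by omega) (hnoc j h)).symm
      · rw [show l.length - 1 - j = j by omega]
      · have hj' : j ≤ l.length - 1 := by omega
        have := pickv_symm l (l.length - 1) (l.length - 1 - j) (by omega)
          (hnoc (l.length - 1 - j) (by omega))
        rw [show l.length - 1 - (l.length - 1 - j) = j by omega] at this
        exact this

lemma final_list (l : List Char) (hn : l.length ≠ 0) :
    (if (resMap l 0 (l.length - 1)).getD ((0 + (l.length - 1) + 1) / 2) ' ' = '?'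
      then (resMap l 0 (l.length - 1)).set ((0 + (l.length - 1) + 1) / 2) 'a'
      else resMap l 0 (l.length - 1)) = candL l := by
  have hm0 : (0 : Nat) + (l.length - 1) = l.length - 1 := Nat.zero_add _
  rw [hm0]
  set m := l.length - 1 with hm
  set t := (m + 1) / 2 with ht
  have htlen : t < l.length := by omega
  have hrlen : (resMap l 0 m).length = l.length := by simp [resMap]
  have hrget : ∀ j, (hj : j < l.length) → (resMap l 0 m)[j]'(by omega) =
      if j ≤ m ∧ 2 * j ≠ m then pickv l m j else l[j] := by
    intro j hj
    unfold resMap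
    rw [List.getElem_mapIdx]
    simp only [hm0, Nat.zero_le, true_and]
  by_cases hq : (resMap l 0 m).getD t ' ' = '?'
  · rw [if_pos hq]
    rw [List.getD_eq_getElem _ ' ' (by omega), hrget t htlen] at hq
    have hmid : 2 * t = m ∧ l[t] = '?' := by
      by_cases h2t : 2 * t = m
      · refine ⟨h2t, ?_⟩
        rwa [if_neg (by omega)] at hq
      · rw [if_pos ⟨by omega, h2t⟩] at hq
        exact absurd hq (pickv_ne l m t)
    apply List.ext_getElem
    · simp [candL, hrlen]
    · intro j hj1 hj2
      have hjn : j < l.length := by simpa [hrlen] using hj1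
      rw [candL_getElem, ← hm]
      by_cases hjt : j = t
      · simp only [hjt]
        rw [List.getElem_set_self (by omega)]
        unfold pickv
        rw [show m - t = t by omega, List.getD_eq_getElem _ ' ' (by omega), hmid.2]
        simp
      · rw [List.getElem_set_ne (by omega), hrget j hjn,
          if_pos ⟨by omega, by omega⟩]
  · rw [if_neg hq]
    rw [List.getD_eq_getElem _ ' ' (by omega), hrget t htlen] at hq
    have h2t : 2 * t = m → l[t] ≠ '?' := by
      intro h2t
      rwa [if_neg (by omega)] at hq
    apply List.ext_getElem
    · simp [candL, hrlen]
    · intro j hj1 hj2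
      have hjn : j < l.length := by simpa [hrlen] using hj1
      rw [candL_getElem, ← hm, hrget j hjn]
      by_cases hc2 : 2 * j = m
      · have hjt : j = t := by omega
        rw [if_neg (by omega)]
        unfold pickv
        rw [show m - j = j by omega, List.getD_eq_getElem _ ' ' (by omega)]
        rw [if_pos (by simpa [hjt] using h2t (hjt ▸ hc2))]
      · rw [if_pos ⟨by omega, hc2⟩]

lemma solution_eq (S : String) : solution S = solution_alt S := by
  simp only [solution, solution_alt]
  have hcand : (List.range S.toList.length).map (fun i =>
      if S.toList.getD i ' ' ≠ '?' then S.toList.getD i ' '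
      else if S.toList.getD (S.toList.length - 1 - i) ' ' ≠ '?' then
        S.toList.getD (S.toList.length - 1 - i) ' '
      else 'a') = candL S.toList := by
    simp only [candL]
    rfl
  rw [hcand]
  by_cases h0 : S.toList.length = 0
  · rw [if_pos h0]
    have hnil : S.toList = [] := List.length_eq_zero_iff.mp h0
    rw [if_pos (by simp [candL, hnil])]
    simp [candL, hnil]
  · rw [if_neg h0]
    rw [solAux_spec S.toList.length S.toList 0 (S.toList.length - 1) (by omega) (by omega)
      (by omega)]
    by_cases hcf : hasConf S.toList 0 (S.toList.length - 1)
    · rw [if_pos hcf]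
      rw [if_neg (by rw [conf_palin, hcf]; simp)]
    · rw [if_neg hcf]
      show String.ofList (if (resMap S.toList 0 (S.toList.length - 1)).getD
          ((0 + (S.toList.length - 1) + 1) / 2) ' ' = '?'
        then (resMap S.toList 0 (S.toList.length - 1)).set
          ((0 + (S.toList.length - 1) + 1) / 2) 'a'
        else resMap S.toList 0 (S.toList.length - 1)) = _
      rw [final_list S.toList h0]
      rw [if_pos ((conf_palin S.toList).mpr (by
        simp only [Bool.not_eq_true] at hcf; exact hcf))]

-- ===== VERDICT (by name: the statement is the Claim_ definition above) =====
theorem solution_spec : Claim_equal_solution := by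
  intro S _
  unfold Spec_solution
  exact solution_eq S
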